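-- pv_equiv track=rewrite | github.com/jglemne/cbr-travel | setup.py | get_cases_price_interval
-- ===== SOURCE A (Python) =====
-- def get_cases_price_interval(lowest_price, highest_price, my_dict):
--     indices = []
--     for price in range(lowest_price, highest_price):
--         empty_dict = False
--         while not empty_dict:
--             if price in my_dict.values():
--                 case = list(my_dict.keys())[list(my_dict.values()).index(price)]
--                 indices.append(case)
--                 my_dict = remove_key(my_dict, case)
--             else:
--                 empty_dict = True
--     return indices
--
-- def remove_key(d, key):
--     r = dict(d)
--     del r[key]
--     return r
-- ===== SOURCE B (Python) =====
-- def get_cases_price_interval(lowest_price, highest_price, my_dict):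
--     by_value = {}
--     for key, value in my_dict.items():
--         by_value.setdefault(value, []).append(key)
--     indices = []
--     for value in sorted(by_value):
--         if lowest_price <= value < highest_price:
--             indices += by_value[value]
--     return indices
-- ===== Notes on version B (the rewrite author's own statement) =====
-- stated objective: alternative
-- what changed: A scans and mutates the whole dict once per price of the range (an inner while with list.index and a dict rebuild per deleted key); B builds a value->keys index in one pass and walks its sorted keys, keeping the in-range buckets, so no per-price rescan or deletion happens.
import Mathlib
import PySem

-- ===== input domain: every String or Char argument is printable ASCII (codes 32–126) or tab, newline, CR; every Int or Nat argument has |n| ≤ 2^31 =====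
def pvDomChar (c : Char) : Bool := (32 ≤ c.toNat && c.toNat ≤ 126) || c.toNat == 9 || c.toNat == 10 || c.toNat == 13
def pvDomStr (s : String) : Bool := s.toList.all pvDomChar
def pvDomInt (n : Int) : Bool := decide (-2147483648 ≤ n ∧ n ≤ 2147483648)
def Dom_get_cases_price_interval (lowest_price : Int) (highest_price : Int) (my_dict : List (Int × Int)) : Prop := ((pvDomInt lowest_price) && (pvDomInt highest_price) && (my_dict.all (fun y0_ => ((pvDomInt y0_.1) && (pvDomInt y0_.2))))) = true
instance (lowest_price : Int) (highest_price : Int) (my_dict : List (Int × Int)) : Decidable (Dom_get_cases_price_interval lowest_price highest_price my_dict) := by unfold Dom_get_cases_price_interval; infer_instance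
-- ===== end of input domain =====

-- B replaces A's per-price scan-and-delete (while + list.index + dict rebuild) by a
-- value->keys index built in one pass whose sorted in-range buckets are concatenated (objective: alternative).


-- ===== PORT A =====
-- remove_key(d, key) = dict(d); del r[key]: on a genuine dict encoding (no duplicate keys,
-- see Pre_) this removes exactly the pair with that key.
def pvRemoveKey (d : List (Int × Int)) (key : Int) : List (Int × Int) :=
  d.eraseP (fun kv => kv.1 == key)

-- the inner 'while not empty_dict' loop; fuel (≥ the number of iterations, which is
-- bounded by the dict size since each iteration deletes a key) only makes it total.
def pvWhileF : Nat → Int → List (Int × Int) → List Int → List Int × List (Int × Int)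
  | 0, _, d, acc => (acc, d)
  | n+1, price, d, acc =>
      match PySem.List.index? (d.map Prod.snd) price with
      | some idx =>
          let case := PySem.List.pyGetD (d.map Prod.fst) (idx : Int) 0
          pvWhileF n price (pvRemoveKey d case) (acc ++ [case])
      | none => (acc, d)

def get_cases_price_interval (lowest_price : Int) (highest_price : Int) (my_dict : List (Int × Int)) : List Int :=
  ((PySem.List.pyRange lowest_price highest_price 1).foldl
      (fun st price => pvWhileF (st.2.length + 1) price st.2 st.1)
      ([], my_dict)).1

-- ===== PORT B =====
-- by_value.setdefault(value, []).append(key), one pass over the dict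
def pvByValue (my_dict : List (Int × Int)) : PySem.Dict Int (List Int) :=
  my_dict.foldl (fun d kv => d.modify kv.2 [] (fun l => l ++ [kv.1])) PySem.Dict.empty

def get_cases_price_interval_alt (lowest_price : Int) (highest_price : Int) (my_dict : List (Int × Int)) : List Int :=
  let by_value := pvByValue my_dict
  (PySem.List.sorted by_value.keys (fun v => v)).foldl
    (fun acc value => if lowest_price ≤ value ∧ value < highest_price
                      then acc ++ by_value.getD value [] else acc) []

-- ===== PRECONDITION & SPEC =====
-- Pre_ excludes association lists with duplicate keys: they do not encode any Python dict
-- (the argument is a dict, whose keys are necessarily distinct), so A is never run on them.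
def Pre_get_cases_price_interval (lowest_price : Int) (highest_price : Int) (my_dict : List (Int × Int)) : Prop :=
  (my_dict.map Prod.fst).Nodup
instance (lowest_price : Int) (highest_price : Int) (my_dict : List (Int × Int)) : Decidable (Pre_get_cases_price_interval lowest_price highest_price my_dict) := by unfold Pre_get_cases_price_interval; infer_instance

def pvWitness_get_cases_price_interval : Int × Int × (List (Int × Int)) := (0, 3, [(1, 2), (4, 0), (7, 2)])

def Spec_get_cases_price_interval (lowest_price : Int) (highest_price : Int) (my_dict : List (Int × Int)) (out : List Int) : Prop := out = get_cases_price_interval_alt lowest_price highest_price my_dict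
instance (lowest_price : Int) (highest_price : Int) (my_dict : List (Int × Int)) (out : List Int) : Decidable (Spec_get_cases_price_interval lowest_price highest_price my_dict out) := by unfold Spec_get_cases_price_interval; infer_instance

-- ===== CLAIM (what is proved, stated in full; the proofs are below) =====
def Claim_equal_get_cases_price_interval : Prop := ∀ (lowest_price : Int) (highest_price : Int) (my_dict : List (Int × Int)), Dom_get_cases_price_interval lowest_price highest_price my_dict → Pre_get_cases_price_interval lowest_price highest_price my_dict → Spec_get_cases_price_interval lowest_price highest_price my_dict (get_cases_price_interval lowest_price highest_price my_dict)

-- ===== LEMMAS AND PROOFS =====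

-- The inner while loop collects, in order, the keys of all pairs whose value is `price`,
-- and leaves the pairs with other values (in order).
lemma pvWhileF_eq (price : Int) : ∀ (n : Nat) (d : List (Int × Int)), d.length < n →
    (d.map Prod.fst).Nodup → ∀ (acc : List Int),
    pvWhileF n price d acc =
      (acc ++ (d.filter (fun kv => kv.2 == price)).map Prod.fst,
       d.filter (fun kv => !(kv.2 == price))) := by
  intro n
  induction n with
  | zero => intro d h; exact absurd h (Nat.not_lt_zero _)
  | succ n ih =>
    intro d hlen hnd acc
    cases hidx : PySem.List.index? (d.map Prod.snd) price with
    | none =>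
      have hmem : price ∉ d.map Prod.snd := (PySem.List.index?_eq_none_iff _ _).1 hidx
      have h1 : d.filter (fun kv => kv.2 == price) = [] := by
        apply List.filter_eq_nil_iff.2
        intro kv hkv
        simp only [beq_iff_eq]
        intro heq
        exact hmem (by simpa [heq] using List.mem_map_of_mem (f := Prod.snd) hkv)
      have h2 : d.filter (fun kv => !(kv.2 == price)) = d := by
        apply List.filter_eq_self.2
        intro kv hkv
        simp only [Bool.not_eq_eq_eq_not, Bool.not_true, beq_eq_false_iff_ne, ne_eq]
        intro heq
        exact hmem (by simpa [heq] using List.mem_map_of_mem (f := Prod.snd) hkv)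
      simp only [pvWhileF]
      rw [hidx]
      simp [h1, h2]
    | some idx =>
      obtain ⟨P, S, hPS, hlenP, hnotP⟩ := (PySem.List.index?_eq_some_iff _ _ _).1 hidx
      obtain ⟨l₁, l₂', hd, hm1, hm2⟩ := List.map_eq_append_iff.1 hPS
      obtain ⟨x, l₂, hl₂, hx2, hm3⟩ := List.map_eq_cons_iff.1 hm2
      subst hl₂; subst hd
      -- the selected key is x.1
      have hcase : PySem.List.pyGetD ((l₁ ++ x :: l₂).map Prod.fst) (idx : Int) 0 = x.1 := by
        rw [PySem.List.pyGetD_natCast]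
        have hidxlen : idx = (l₁.map Prod.fst).length := by
          simpa [← hlenP, ← hm1] using rfl
        simp [List.getD_eq_getElem?_getD, List.map_append, hidxlen]
      -- keys are distinct, so x.1 does not occur in l₁
      have hndkeys := hnd
      rw [List.map_append, List.map_cons] at hndkeys
      have hx1 : x.1 ∉ l₁.map Prod.fst := by
        intro hmem'
        exact ((List.nodup_append.1 hndkeys).2.2 _ hmem' _ (by simp)) rfl
      have hx1notl₁ : ∀ b ∈ l₁, ¬ ((fun kv => kv.1 == x.1) b = true) := by
        intro b hb hbeq
        have hb1 : b.1 = x.1 := by simpa using hbeq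
        exact hx1 (hb1 ▸ List.mem_map_of_mem (f := Prod.fst) hb)
      have hremove : pvRemoveKey (l₁ ++ x :: l₂) x.1 = l₁ ++ l₂ := by
        unfold pvRemoveKey
        rw [List.eraseP_append_right _ hx1notl₁, List.eraseP_cons_of_pos (by simp)]
      -- l₁ has no pair with value price (first-occurrence property)
      have hl₁price : ∀ kv ∈ l₁, kv.2 ≠ price := by
        intro kv hkv heq
        exact hnotP (by rw [← hm1]; exact heq ▸ List.mem_map_of_mem (f := Prod.snd) hkv)
      have hndrest : ((l₁ ++ l₂).map Prod.fst).Nodup := by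
        have : (l₁ ++ l₂).Sublist (l₁ ++ x :: l₂) := by
          exact List.Sublist.append_left (List.sublist_cons_self _ _) _
        exact (this.map Prod.fst).nodup (by simpa using hnd)
      have hlenrest : (l₁ ++ l₂).length < n := by
        simp only [List.length_append, List.length_cons] at hlen ⊢; omega
      -- unfold one step and apply the IH
      simp only [pvWhileF]
      rw [hidx]
      simp only [hcase, hremove]
      rw [ih _ hlenrest hndrest]
      simp only [Prod.mk.injEq]
      refine ⟨?_, ?_⟩
      · -- accumulated keys
        have h1 : l₁.filter (fun kv => kv.2 == price) = [] :=
          List.filter_eq_nil_iff.2 (fun kv hkv => by simpa using hl₁price kv hkv)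
        simp [List.filter_append, h1, hx2, List.append_assoc]
      · -- remaining dict
        have h2 : l₁.filter (fun kv => !(kv.2 == price)) = l₁ :=
          List.filter_eq_self.2 (fun kv hkv => by simpa using hl₁price kv hkv)
        simp [List.filter_append, h2, hx2]

-- The outer for loop: on distinct prices, deletions for earlier prices do not affect
-- later buckets, so the result is a flatMap of per-price buckets of the ORIGINAL dict.
lemma loopA_eq : ∀ (ps : List Int), ps.Nodup → ∀ (d : List (Int × Int)),
    (d.map Prod.fst).Nodup → ∀ (acc : List Int),
    (ps.foldl (fun st price => pvWhileF (st.2.length + 1) price st.2 st.1) (acc, d)).1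
      = acc ++ ps.flatMap (fun p => (d.filter (fun kv => kv.2 == p)).map Prod.fst) := by
  intro ps
  induction ps with
  | nil => intro _ d _ acc; simp
  | cons p ps ih =>
    intro hnodup d hnd acc
    have hstep := pvWhileF_eq p (d.length + 1) d (Nat.lt_succ_self _) hnd acc
    rw [List.foldl_cons, hstep]
    have hnd' : ((d.filter (fun kv => !(kv.2 == p))).map Prod.fst).Nodup :=
      ((List.filter_sublist).map Prod.fst).nodup hnd
    rw [ih (List.nodup_cons.1 hnodup).2 _ hnd']
    have hcongr : ∀ p' ∈ ps,
        (d.filter (fun kv => !(kv.2 == p))).filter (fun kv => kv.2 == p')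
          = d.filter (fun kv => kv.2 == p') := by
      intro p' hp'
      have hne : p' ≠ p := fun h => (List.nodup_cons.1 hnodup).1 (h ▸ hp')
      rw [List.filter_filter]
      apply List.filter_congr
      intro kv _
      by_cases h : kv.2 = p'
      · simp [h, hne]
      · simp [h]
    have : ps.flatMap (fun p' => ((d.filter (fun kv => !(kv.2 == p))).filter (fun kv => kv.2 == p')).map Prod.fst)
        = ps.flatMap (fun p' => (d.filter (fun kv => kv.2 == p')).map Prod.fst) := by
      rw [List.flatMap_def, List.flatMap_def]
      congr 1
      exact List.map_congr_left (fun p' hp' => by rw [hcongr p' hp'])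
    rw [this]
    simp [List.append_assoc]

-- B's index lookup returns exactly the per-price bucket.
lemma pvByValue_getD (l : List (Int × Int)) (p : Int) :
    (pvByValue l).getD p [] = (l.filter (fun kv => kv.2 == p)).map Prod.fst := by
  unfold pvByValue
  have : l.foldl (fun d kv => d.modify kv.2 [] (fun t => t ++ [kv.1])) PySem.Dict.empty
      = (l.map (fun kv => (kv.2, kv.1))).foldl (fun d q => d.modify q.1 [] (fun t => t ++ [q.2])) PySem.Dict.empty := by
    rw [List.foldl_map]
  rw [this, PySem.Dict.getD_foldl_modify_append, PySem.Dict.getD_empty]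
  simp [List.filter_map, Function.comp_def, List.map_map]

-- dropping elements with an empty bucket does not change a flatMap
lemma pvFlatMap_filter {α β : Type} (g : α → List β) (p : α → Bool) :
    ∀ (l : List α), (∀ v ∈ l, p v = false → g v = []) →
    l.flatMap g = (l.filter p).flatMap g := by
  intro l
  induction l with
  | nil => intro _; rfl
  | cons a t ih =>
    intro h
    cases hp : p a with
    | true => simp [hp, ih (fun v hv => h v (List.mem_cons_of_mem a hv))]
    | false =>
      simp [hp, h a (List.mem_cons_self ..) hp,
        ih (fun v hv => h v (List.mem_cons_of_mem a hv))]

-- the in-range slice of an ascending range and the in-range slice of the sorted distinct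
-- values are the same list: both strictly increasing with the same members
lemma pvFilter_range_eq_filter_sorted (low high : Int) (ks : List Int) (hnd : ks.Nodup) :
    (PySem.List.pyRange low high 1).filter (fun v => decide (v ∈ ks))
      = (PySem.List.sorted ks (fun v => v)).filter (fun v => decide (low ≤ v ∧ v < high)) := by
  have hperm : (PySem.List.sorted ks (fun v => v)).Perm ks := PySem.List.sorted_perm ks _ false
  have hndS : (PySem.List.sorted ks (fun v => v)).Nodup := hperm.nodup_iff.2 hnd
  have hltS : (PySem.List.sorted ks (fun v => v)).Pairwise (fun a b => a < b) :=
    ((PySem.List.sorted_pairwise ks (fun v => v)).and hndS).imp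
      (fun h => lt_of_le_of_ne h.1 h.2)
  refine List.Perm.eq_of_pairwise (le := fun a b : Int => a < b)
      (fun a b _ _ h1 h2 => absurd h2 (not_lt.2 h1.le))
      (List.Pairwise.filter _ (by simpa using PySem.List.pairwise_lt_pyRange_one low high))
      (List.Pairwise.filter _ hltS) ?_
  apply (List.perm_ext_iff_of_nodup ((PySem.List.nodup_pyRange_one low high).filter _)
      (hndS.filter _)).2
  intro v
  simp only [List.mem_filter, PySem.List.mem_pyRange_one, hperm.mem_iff,
    decide_eq_true_eq]
  tauto

-- ===== VERDICT (by name: the statement is the Claim_ definition above) =====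
theorem get_cases_price_interval_spec : Claim_equal_get_cases_price_interval := by
  intro low high d _ hpre
  unfold Spec_get_cases_price_interval get_cases_price_interval get_cases_price_interval_alt
  rw [loopA_eq _ (by simpa using PySem.List.nodup_pyRange_one low high) d hpre []]
  simp only [List.nil_append]
  rw [PySem.List.foldl_ite_eq_foldl_filter, PySem.List.foldl_append_eq_flatMap]
  simp only [List.nil_append]
  -- both sides as flatMaps of the bucket function of the index
  have hbucket : (PySem.List.pyRange low high 1).flatMap
        (fun p => (d.filter (fun kv => kv.2 == p)).map Prod.fst)
      = (PySem.List.pyRange low high 1).flatMap (fun p => (pvByValue d).getD p []) := by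
    rw [List.flatMap_def, List.flatMap_def]
    congr 1
    exact List.map_congr_left (fun p _ => (pvByValue_getD d p).symm)
  rw [hbucket]
  -- keys of the index are distinct
  have hndk : (pvByValue d).keys.Nodup := by
    unfold pvByValue
    exact PySem.Dict.nodup_keys_foldl_modify_key d Prod.snd []
      (fun d kv t => t ++ [kv.1]) PySem.Dict.empty (by simp)
  -- drop the prices with no bucket, then identify the two strictly increasing lists
  rw [pvFlatMap_filter (fun p => (pvByValue d).getD p []) (fun v => (pvByValue d).contains v)
      _ (fun v _ hv => PySem.Dict.getD_of_not_contains _ _ hv)]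
  have : (PySem.List.pyRange low high 1).filter (fun v => (pvByValue d).contains v)
      = (PySem.List.pyRange low high 1).filter (fun v => decide (v ∈ (pvByValue d).keys)) := by
    exact List.filter_congr (fun v _ => PySem.Dict.contains_eq_decide_mem_keys _ v)
  rw [this, pvFilter_range_eq_filter_sorted low high _ hndk]
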